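-- pv_equiv track=rewrite | github.com/harrisrezal/timelycal | backend/services/pdf_parser.py | _parse_lines
-- ===== SOURCE A (Python) =====
-- def _parse_lines(text: str) -> list[str]:
--     """
--     Fallback: split text into non-empty lines as chunks.
--     Groups lines into blocks of 5 for context.
--     """
--     lines = [l.strip() for l in text.splitlines() if l.strip()]
--     chunks = []
--     block_size = 5
--     for i in range(0, len(lines), block_size):
--         block = " | ".join(lines[i:i + block_size])
--         chunks.append(block)
--     return chunks
-- ===== SOURCE B (Python) =====
-- def _parse_lines(text: str) -> list[str]:
--     chunks = []
--     buf = []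
--     for l in text.splitlines():
--         s = l.strip()
--         if s:
--             buf.append(s)
--             if len(buf) == 5:
--                 chunks.append(" | ".join(buf))
--                 buf = []
--     if buf:
--         chunks.append(" | ".join(buf))
--     return chunks
-- ===== Notes on version B (the rewrite author's own statement) =====
-- stated objective: alternative
-- what changed: Replaces the intermediate filtered list plus index-stride slicing with a single pass over the raw lines using an accumulate-and-flush buffer of 5.
import Mathlib
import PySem

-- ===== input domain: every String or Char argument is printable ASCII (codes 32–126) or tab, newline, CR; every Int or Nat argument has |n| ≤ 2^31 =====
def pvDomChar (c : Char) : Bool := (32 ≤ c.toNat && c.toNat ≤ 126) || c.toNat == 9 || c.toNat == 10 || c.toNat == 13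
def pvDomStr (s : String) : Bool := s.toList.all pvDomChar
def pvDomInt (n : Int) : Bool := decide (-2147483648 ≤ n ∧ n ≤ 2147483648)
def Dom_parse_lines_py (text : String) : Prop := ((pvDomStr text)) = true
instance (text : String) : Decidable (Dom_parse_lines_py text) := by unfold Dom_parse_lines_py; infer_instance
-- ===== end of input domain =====

-- ===== PORT A =====
-- B replaces A's intermediate filtered list + index-stride slicing with one accumulate-and-flush pass (alternative decomposition).
def parse_lines_py (text : String) : List String :=
  let lines := (PySem.Str.splitlines text).filterMap (fun l =>
    if PySem.Str.strip l ≠ "" then some (PySem.Str.strip l) else none)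
  (PySem.List.pyRange 0 (lines.length : Int) 5).foldl
    (fun chunks i =>
      chunks ++ [PySem.Str.join " | " (PySem.List.slice lines (some i) (some (i + 5)))])
    []

-- ===== PORT B =====
def pvAltStep (st : List String × List String) (l : String) : List String × List String :=
  let s := PySem.Str.strip l
  if s ≠ "" then
    let buf := st.2 ++ [s]
    if buf.length == 5 then (st.1 ++ [PySem.Str.join " | " buf], []) else (st.1, buf)
  else st

def parse_lines_py_alt (text : String) : List String :=
  let st := (PySem.Str.splitlines text).foldl pvAltStep ([], [])
  if st.2 ≠ [] then st.1 ++ [PySem.Str.join " | " st.2] else st.1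

-- ===== PRECONDITION & SPEC =====
def Spec_parse_lines_py (text : String) (out : List String) : Prop := out = parse_lines_py_alt text
instance (text : String) (out : List String) : Decidable (Spec_parse_lines_py text out) := by unfold Spec_parse_lines_py; infer_instance

-- ===== CLAIM (what is proved, stated in full; the proofs are below) =====
def Claim_equal_parse_lines_py : Prop := ∀ (text : String), Dom_parse_lines_py text → Spec_parse_lines_py text (parse_lines_py text)

-- ===== LEMMAS AND PROOFS =====

-- reference chunking: blocks of 5, joined with " | "
def pvChunks5 (xs : List String) : List String :=
  if xs = [] then [] else PySem.Str.join " | " (xs.take 5) :: pvChunks5 (xs.drop 5)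
termination_by xs.length
decreasing_by simp; cases xs <;> simp_all

lemma pvChunks5_nil : pvChunks5 [] = [] := by simp [pvChunks5]

lemma pvChunks5_ne_nil (xs : List String) (h : xs ≠ []) :
    pvChunks5 xs = PySem.Str.join " | " (xs.take 5) :: pvChunks5 (xs.drop 5) := by
  rw [pvChunks5]; simp [h]

-- step-5 range peels its head
lemma pvRange5_cons (k n : Nat) (h : k < n) :
    PySem.List.pyRange (k : Int) (n : Int) 5 = (k : Int) :: PySem.List.pyRange ((k : Int) + 5) (n : Int) 5 := by
  rw [PySem.List.pyRange_of_pos _ _ (by norm_num), PySem.List.pyRange_of_pos _ _ (by norm_num)]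
  have h1 : (k : Int) < n := by exact_mod_cast h
  have h2 : (((n : Int) - k + 5 - 1) / 5).toNat = (((n : Int) - (k + 5) + 5 - 1) / 5).toNat + 1 := by
    omega
  rw [if_pos h1, h2, List.range_succ_eq_map]
  by_cases h3 : (k : Int) + 5 < n
  · rw [if_pos h3]
    simp [List.map_map, Function.comp]
    intro a _
    ring
  · rw [if_neg h3]
    have : (((n : Int) - (k + 5) + 5 - 1) / 5).toNat = 0 := by omega
    simp [this]

-- A's fold over the stride-5 range computes pvChunks5 of the suffix
lemma pvA_fold (L : List String) (k : Nat) (acc : List String) :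
    (PySem.List.pyRange (k : Int) (L.length : Int) 5).foldl
      (fun chunks i =>
        chunks ++ [PySem.Str.join " | " (PySem.List.slice L (some i) (some (i + 5)))])
      acc = acc ++ pvChunks5 (L.drop k) := by
  by_cases h : k < L.length
  · rw [pvRange5_cons k L.length h, List.foldl_cons]
    have hs : PySem.List.slice L (some (k : Int)) (some ((k : Int) + 5)) = (L.drop k).take 5 := by
      have := PySem.List.slice_natCast_add L k 5
      simpa using this
    have hd : L.drop (k + 5) = (L.drop k).drop 5 := by
      rw [List.drop_drop]
    rw [hs]
    rw [show ((k : Int) + 5) = ((k + 5 : Nat) : Int) by omega]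
    rw [pvA_fold L (k + 5) _]
    rw [hd]
    have hne : L.drop k ≠ [] := by
      simp [List.drop_eq_nil_iff]; omega
    rw [pvChunks5_ne_nil _ hne]
    simp
  · have h1 : PySem.List.pyRange (k : Int) (L.length : Int) 5 = [] := by
      rw [PySem.List.pyRange_of_pos _ _ (by norm_num)]
      rw [if_neg (by exact_mod_cast h)]; simp
    have h2 : L.drop k = [] := by
      simp [List.drop_eq_nil_iff]; omega
    simp [h1, h2, pvChunks5_nil]
termination_by L.length - k
decreasing_by omega

-- B's fold over raw lines = fold of the core step over the filtered stripped lines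
def pvCore (st : List String × List String) (s : String) : List String × List String :=
  let buf := st.2 ++ [s]
  if buf.length == 5 then (st.1 ++ [PySem.Str.join " | " buf], []) else (st.1, buf)

lemma pvAlt_filter (raws : List String) (st : List String × List String) :
    raws.foldl pvAltStep st =
      (raws.filterMap (fun l => if PySem.Str.strip l ≠ "" then some (PySem.Str.strip l) else none)).foldl pvCore st := by
  induction raws generalizing st with
  | nil => rfl
  | cons l rest ih =>
      by_cases h : PySem.Str.strip l ≠ ""
      · rw [List.foldl_cons, List.filterMap_cons, if_pos h, List.foldl_cons,
          show pvAltStep st l = pvCore st (PySem.Str.strip l) by simp [pvAltStep, pvCore, h]]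
        exact ih _
      · rw [List.foldl_cons, List.filterMap_cons, if_neg h,
          show pvAltStep st l = st by simp [pvAltStep, h]]
        exact ih _

def pvFlush (st : List String × List String) : List String :=
  if st.2 ≠ [] then st.1 ++ [PySem.Str.join " | " st.2] else st.1

-- flush-after-fold of the core step computes pvChunks5
lemma pvB_fold (xs : List String) (chunks buf : List String) (hb : buf.length < 5) :
    pvFlush (xs.foldl pvCore (chunks, buf)) = chunks ++ pvChunks5 (buf ++ xs) := by
  induction xs generalizing chunks buf with
  | nil =>
      by_cases h : buf = []
      · simp [h, pvFlush, pvChunks5_nil]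
      · rw [List.append_nil, pvChunks5_ne_nil _ h]
        have ht : buf.take 5 = buf := List.take_of_length_le (by omega)
        have hd : buf.drop 5 = [] := by simp [List.drop_eq_nil_iff]; omega
        simp [pvFlush, h, ht, hd, pvChunks5_nil]
  | cons s rest ih =>
      simp only [List.foldl_cons, pvCore]
      by_cases h5 : (buf ++ [s]).length = 5
      · rw [if_pos (by simpa using h5)]
        rw [ih _ [] (by norm_num)]
        rw [show buf ++ s :: rest = (buf ++ [s]) ++ rest by simp]
        rw [pvChunks5_ne_nil ((buf ++ [s]) ++ rest) (by simp)]
        have ht : ((buf ++ [s]) ++ rest).take 5 = buf ++ [s] := by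
          rw [List.take_append_of_le_length (by omega)]
          exact List.take_of_length_le (by omega)
        have hd : ((buf ++ [s]) ++ rest).drop 5 = rest := by
          rw [List.drop_append_of_le_length (by omega)]
          simp [h5, List.drop_eq_nil_iff]
        rw [ht, hd]
        simp
      · rw [if_neg (by simpa using h5)]
        rw [ih _ _ (by simp at h5 ⊢; omega)]
        simp

-- ===== VERDICT (by name: the statement is the Claim_ definition above) =====
theorem parse_lines_py_spec : Claim_equal_parse_lines_py := by
  intro text _
  unfold Spec_parse_lines_py parse_lines_py parse_lines_py_alt
  rw [pvAlt_filter]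
  set lines := (PySem.Str.splitlines text).filterMap
      (fun l => if PySem.Str.strip l ≠ "" then some (PySem.Str.strip l) else none) with hl
  have hA := pvA_fold lines 0 []
  simp only [Nat.cast_zero] at hA
  rw [hA]
  simp only [List.nil_append, List.drop_zero]
  have hB := pvB_fold lines [] [] (by norm_num)
  simp only [List.nil_append] at hB
  rw [← hB]
  rfl
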